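-- pv_equiv track=rewrite | github.com/kirill-kondrashov/lean-misc | tools/problem1_odd_profile_search.py | t_of_v_family
-- ===== SOURCE A (Python) =====
-- from typing import Dict, Iterable, List, Sequence, Set, Tuple
--
-- Family = Tuple[int, ...]
--
-- def subset_cardinality(mask: int) -> int:
--     return mask.bit_count()
--
-- def t_of_v_family(v_family: Sequence[int], subsets: Sequence[int]) -> Family:
--     if not v_family:
--         return ()
--     source_rank = subset_cardinality(v_family[0])
--     target_rank = source_rank + 1
--     v_set = set(v_family)
--     targets: List[int] = []
--     for subset in subsets:
--         if subset_cardinality(subset) != target_rank: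
--             continue
--         candidates = subset
--         all_predecessors_present = True
--         while candidates:
--             bit = candidates & -candidates
--             predecessor = subset ^ bit
--             if predecessor not in v_set:
--                 all_predecessors_present = False
--                 break
--             candidates ^= bit
--         if all_predecessors_present:
--             targets.append(subset)
--     return tuple(sorted(targets))
-- ===== SOURCE B (Python) =====
-- def t_of_v_family(v_family, subsets):
--     if not v_family:
--         return ()
--     target_rank = v_family[0].bit_count() + 1
--     universe = 0
--     for s in subsets:
--         if s >= 0:
--             universe |= s
--     count = {}
--     for v in set(v_family):
--         if v < 0:
--             continue
--         free = universe & ~v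
--         for i in range(free.bit_length()):
--             if (free >> i) & 1:
--                 succ = v | (1 << i)
--                 count[succ] = count.get(succ, 0) + 1
--     return tuple(sorted(s for s in subsets
--                         if s.bit_count() == target_rank and count.get(s, 0) == target_rank))
-- ===== Notes on version B (the rewrite author's own statement) =====
-- stated objective: alternative
-- what changed: B replaces A's per-subset predecessor-verification loop (peel lowest bit, look each predecessor up in the set) by a successor-counting table: it counts, for every deduplicated family member v and every universe bit absent from v, the successor v|bit once up front, and then keeps a subset exactly when its bit count and its table count both equal the target rank.
import Mathlib
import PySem

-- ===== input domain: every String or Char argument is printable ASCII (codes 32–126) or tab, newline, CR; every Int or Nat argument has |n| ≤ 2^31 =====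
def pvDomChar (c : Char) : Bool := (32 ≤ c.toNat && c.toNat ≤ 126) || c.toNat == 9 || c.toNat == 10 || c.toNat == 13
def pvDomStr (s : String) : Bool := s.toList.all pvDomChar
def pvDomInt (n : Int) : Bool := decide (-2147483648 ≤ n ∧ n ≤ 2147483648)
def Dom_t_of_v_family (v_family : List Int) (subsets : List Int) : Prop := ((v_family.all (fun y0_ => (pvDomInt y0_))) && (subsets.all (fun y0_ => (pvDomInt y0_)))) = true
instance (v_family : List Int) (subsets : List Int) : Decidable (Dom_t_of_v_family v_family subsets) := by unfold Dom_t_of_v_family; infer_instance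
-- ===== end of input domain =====

-- B replaces A's per-subset predecessor-verification loop by a successor table counted
-- once from the deduplicated family (alternative decomposition; same observable result).

-- ===== PORT A =====
-- the 'while candidates:' loop. Fuel subset.natAbs + 1 suffices: a nonnegative candidate
-- strictly decreases each step, and a negative candidate can only leave the loop through
-- the break (result false), which is also the value returned on fuel exhaustion — exact.
def pvPredLoop (v_set : List Int) (subset : Int) : Nat → Int → Bool
  | fuel, candidates =>
    if candidates = 0 then true
    else
      match fuel with
      | 0 => false
      | f + 1 =>
        let bit := PySem.Int.band candidates (-candidates)
        let predecessor := PySem.Int.bxor subset bit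
        if v_set.contains predecessor then
          pvPredLoop v_set subset f (PySem.Int.bxor candidates bit)
        else false

def t_of_v_family (v_family : List Int) (subsets : List Int) : List Int :=
  match v_family with
  | [] => []
  | v0 :: _ =>
    let source_rank : Int := (PySem.Int.bitCount v0 : Int)
    let target_rank : Int := source_rank + 1
    let v_set : PySem.Set Int := PySem.Set.ofList v_family
    let targets : List Int := subsets.foldl (fun targets subset =>
      if (PySem.Int.bitCount subset : Int) ≠ target_rank then targets
      else if pvPredLoop v_set subset (subset.natAbs + 1) subset then targets ++ [subset]
      else targets) []
    PySem.List.sorted targets (fun x => x) false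

-- ===== PORT B =====
def t_of_v_family_alt (v_family : List Int) (subsets : List Int) : List Int :=
  match v_family with
  | [] => []
  | v0 :: _ =>
    let target_rank : Int := (PySem.Int.bitCount v0 : Int) + 1
    let univ : Int := subsets.foldl (fun u s => if 0 ≤ s then PySem.Int.bor u s else u) 0
    -- i drawn from range(0, free.bit_length()) is nonnegative, so i.toNat is exact
    let count : PySem.Dict Int Int :=
      (PySem.Set.ofList v_family).foldl (fun c v =>
        if v < 0 then c
        else
          let free := PySem.Int.band univ (Int.not v)
          (PySem.List.pyRange 0 (PySem.Int.bitLength free : Int) 1).foldl (fun c i =>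
            if PySem.Int.band (Int.shiftRight free i.toNat) 1 ≠ 0 then
              let succ := PySem.Int.bor v (Int.shiftLeft 1 i.toNat)
              c.insert succ (c.getD succ 0 + 1)
            else c) c) PySem.Dict.empty
    PySem.List.sorted (subsets.filter (fun s =>
      ((PySem.Int.bitCount s : Int) == target_rank) && (count.getD s 0 == target_rank)))
      (fun x => x) false

-- ===== PRECONDITION & SPEC =====
def Spec_t_of_v_family (v_family : List Int) (subsets : List Int) (out : List Int) : Prop := out = t_of_v_family_alt v_family subsets
instance (v_family : List Int) (subsets : List Int) (out : List Int) : Decidable (Spec_t_of_v_family v_family subsets out) := by unfold Spec_t_of_v_family; infer_instance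

-- ===== CLAIM (what is proved, stated in full; the proofs are below) =====
def Claim_equal_t_of_v_family : Prop := ∀ (v_family : List Int) (subsets : List Int), Dom_t_of_v_family v_family subsets → Spec_t_of_v_family v_family subsets (t_of_v_family v_family subsets)

-- ===== LEMMAS AND PROOFS =====


-- Nat groundwork ------------------------------------------------------------


theorem pvXorAdd (n : Nat) : ∀ m, (∀ i, m.testBit i = true → n.testBit i = true) → (n ^^^ m) + m = n := by
  induction n using Nat.strong_induction_on with
  | _ n IH =>
    intro m h
    rcases Nat.eq_zero_or_pos n with hn | hn
    · subst hn
      have hm : m = 0 := Nat.eq_of_testBit_eq fun i => by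
        have := h i
        simp only [Nat.zero_testBit] at *
        cases hmi : m.testBit i with
        | true => exact absurd (this hmi) (by simp)
        | false => rfl
      simp [hm]
    · have h' : ∀ i, (m / 2).testBit i = true → (n / 2).testBit i = true := by
        intro i hi
        rw [Nat.testBit_div_two] at hi ⊢
        exact h _ hi
      have IH' := IH (n / 2) (by omega) (m / 2) h'
      have hb : m % 2 = 1 → n % 2 = 1 := by
        intro hm1
        have := h 0
        simp [Nat.testBit_zero, hm1] at this
        exact this
      have hX2 : (n ^^^ m) / 2 = (n / 2) ^^^ (m / 2) := Nat.xor_div_two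
      have hXm : (n ^^^ m) % 2 = if n % 2 = m % 2 then 0 else 1 := by
        have hx := Nat.testBit_xor n m 0
        simp only [Nat.testBit_zero] at hx
        rcases Nat.mod_two_eq_zero_or_one n with e1 | e1 <;>
          rcases Nat.mod_two_eq_zero_or_one m with e2 | e2 <;>
          simp [e1, e2] at hx ⊢ <;> omega
      have e1 : n ^^^ m = 2 * ((n ^^^ m) / 2) + (n ^^^ m) % 2 := by omega
      rw [hX2] at e1
      set X := n ^^^ m with hXdef
      set c := n / 2 ^^^ m / 2 with hcdef
      clear_value X c
      rcases Nat.mod_two_eq_zero_or_one n with hn2 | hn2 <;>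
        rcases Nat.mod_two_eq_zero_or_one m with hm2 | hm2 <;>
        simp [hn2, hm2] at hXm <;> omega

theorem pvSubmaskSub (m n : Nat) (h : ∀ i, m.testBit i = true → n.testBit i = true) :
    n - m = n ^^^ m := by
  have := pvXorAdd n m h
  omega


-- helpers about doubling
theorem pvTestBitTwoMul (x : Nat) : (2 * x).testBit 0 = false ∧ ∀ i, (2 * x).testBit (i+1) = x.testBit i := by
  constructor
  · simp [Nat.testBit_zero]
  · intro i
    rw [← Nat.testBit_div_two]
    congr 1
    omega

theorem pvLowbitSpec (n : Nat) : n ≠ 0 →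
    ∃ j, n.testBit j = true ∧ n - (n &&& (n - 1)) = 2 ^ j := by
  induction n using Nat.strong_induction_on with
  | _ n IH =>
    intro hn
    rcases Nat.mod_two_eq_zero_or_one n with hpar | hpar
    · -- even, n = 2*m, m > 0
      have hm : n = 2 * (n / 2) := by omega
      have hm0 : n / 2 ≠ 0 := by omega
      obtain ⟨j', hbit, heq⟩ := IH (n / 2) (by omega) hm0
      have hand : n &&& (n - 1) = 2 * ((n / 2) &&& (n / 2 - 1)) := by
        apply Nat.eq_of_testBit_eq
        intro i
        cases i with
        | zero =>
          simp [Nat.testBit_zero]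
          omega
        | succ i =>
          rw [Nat.testBit_and, (pvTestBitTwoMul _).2 i]
          have h1 : n.testBit (i+1) = (n / 2).testBit i := by
            rw [← Nat.testBit_div_two]
          have h2 : (n - 1).testBit (i+1) = (n / 2 - 1).testBit i := by
            rw [← Nat.testBit_div_two]
            congr 1
            omega
          rw [h1, h2, ← Nat.testBit_and]
      have hle : (n / 2) &&& (n / 2 - 1) ≤ n / 2 := Nat.and_le_left
      refine ⟨j' + 1, ?_, ?_⟩
      · rw [← Nat.testBit_div_two]; exact hbit
      · rw [hand]
        have : 2 ^ (j' + 1) = 2 * 2 ^ j' := by ring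
        omega
    · -- odd: j = 0, n &&& (n-1) = n - 1
      have hand : n &&& (n - 1) = n - 1 := by
        apply Nat.eq_of_testBit_eq
        intro i
        rw [Nat.testBit_and]
        cases i with
        | zero =>
          simp [Nat.testBit_zero]
          omega
        | succ i =>
          have h2 : (n - 1).testBit (i+1) = (n / 2).testBit i := by
            rw [← Nat.testBit_div_two]
            congr 1
            omega
          have h1 : n.testBit (i+1) = (n / 2).testBit i := by
            rw [← Nat.testBit_div_two]
          rw [h1, h2]
          cases (n / 2).testBit i <;> simp
      refine ⟨0, ?_, ?_⟩
      · simp [Nat.testBit_zero]; omega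
      · rw [hand]; omega


theorem pvBandNegSelf (nc : Nat) (h : nc ≠ 0) :
    PySem.Int.band (nc : Int) (-(nc : Int)) = ((nc - (nc &&& (nc - 1)) : Nat) : Int) := by
  have h1 : ¬ (0 ≤ -(nc : Int)) := by omega
  simp only [PySem.Int.band, h1, if_false, if_pos (by omega : (0:Int) ≤ (nc:Int))]
  congr 1
  have h2 : (-(-(nc:Int)) - 1).toNat = nc - 1 := by omega
  rw [h2, Int.toNat_natCast]

theorem pvBandNotCast (nu nv : Nat) :
    PySem.Int.band (nu : Int) (Int.not (nv : Int)) = ((nu - (nu &&& nv) : Nat) : Int) := by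
  have hnot : Int.not (nv : Int) = -(nv : Int) - 1 := by
    show Int.negSucc nv = _
    rw [Int.negSucc_eq]
    ring
  rw [hnot]
  have h1 : ¬ (0 ≤ -(nv : Int) - 1) := by omega
  simp only [PySem.Int.band, h1, if_false, if_pos (by omega : (0:Int) ≤ (nu:Int))]
  congr 1
  have h2 : (-(-(nv:Int) - 1) - 1).toNat = nv := by omega
  rw [h2, Int.toNat_natCast]

theorem pvBxorNegNonneg (a b : Int) (ha : a < 0) (hb : 0 ≤ b) : PySem.Int.bxor a b < 0 := by
  simp only [PySem.Int.bxor, if_neg (by omega : ¬ (0 ≤ a)), if_pos hb]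
  omega

theorem pvBandNegNonneg (c : Int) (hc : c < 0) : 0 ≤ PySem.Int.band c (-c) := by
  simp only [PySem.Int.band, if_neg (by omega : ¬ (0 ≤ c)), if_pos (by omega : (0:Int) ≤ -c)]
  omega

theorem pvShiftRightCast (m : Nat) (k : Nat) : Int.shiftRight (m : Int) k = ((m >>> k : Nat) : Int) := rfl

theorem pvShiftLeftOne (k : Nat) : Int.shiftLeft 1 k = ((2 ^ k : Nat) : Int) := by
  show Int.ofNat (1 <<< k) = _
  rw [Nat.one_shiftLeft]
  rfl

theorem pvTestBitInt (m k : Nat) :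
    (PySem.Int.band (Int.shiftRight (m : Int) k) 1 ≠ 0) ↔ m.testBit k = true := by
  rw [pvShiftRightCast]
  have h1 : (1 : Int) = ((1 : Nat) : Int) := rfl
  rw [h1, PySem.Int.band_natCast]
  rw [← Nat.decide_shiftRight_mod_two_eq_one]
  have h2 : (m >>> k) &&& 1 = (m >>> k) % 2 := Nat.and_one_is_mod _
  rw [h2]
  constructor
  · intro hne
    simp only [decide_eq_true_eq]
    omega
  · intro hd
    simp only [decide_eq_true_eq] at hd
    omega

theorem pvTestBitLtBitLength (nfree i : Nat) (h : nfree.testBit i = true) :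
    i < PySem.Int.bitLength (nfree : Int) := by
  have h1 : 2 ^ i ≤ nfree := Nat.ge_two_pow_of_testBit h
  have h2 : ((nfree : Int)).natAbs < 2 ^ PySem.Int.bitLength (nfree : Int) :=
    PySem.Int.lt_two_pow_bitLength _
  rw [Int.natAbs_natCast] at h2
  have : 2 ^ i < 2 ^ PySem.Int.bitLength (nfree : Int) := by omega
  exact (Nat.pow_lt_pow_iff_right (by omega)).mp this

theorem pvBitCountCountP (w : Nat) : ∀ (ns : Nat), ns < 2 ^ w →
    (PySem.Int.bitCount (ns : Int) : Int) = ((List.range w).countP ns.testBit : Int) := by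
  induction w with
  | zero =>
    intro ns h
    have h0 : ns = 0 := by omega
    subst h0
    rw [List.range_zero]
    simp [PySem.Int.bitCount_natCast_zero]
  | succ w IH =>
    intro ns h
    rcases Nat.eq_zero_or_pos ns with h0 | h0
    · subst h0
      have hz : (List.range (w+1)).countP (Nat.testBit 0) = 0 :=
        List.countP_eq_zero.mpr (by intro a _; simp [Nat.zero_testBit])
      rw [hz]
      simp [PySem.Int.bitCount_natCast_zero]
    · rw [PySem.Int.bitCount_natCast h0]
      have hrange : List.range (w + 1) = 0 :: (List.range w).map Nat.succ :=
        List.range_succ_eq_map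
      rw [hrange]
      rw [List.countP_cons, List.countP_map]
      have hcomp : (ns.testBit ∘ Nat.succ) = (ns / 2).testBit := by
        funext i
        simp [Function.comp, ← Nat.testBit_div_two]
      rw [hcomp]
      have IH' := IH (ns / 2) (by omega)
      have hb : ns.testBit 0 = decide (ns % 2 = 1) := Nat.testBit_zero ns
      set B := PySem.Int.bitCount ((ns / 2 : Nat) : Int) with hB
      clear_value B
      rcases Nat.mod_two_eq_zero_or_one ns with e | e
      · have hb' : ns.testBit 0 = false := by rw [hb]; simp [e]
        rw [hb', if_neg (by simp)]
        omega
      · have hb' : ns.testBit 0 = true := by rw [hb]; simp [e]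
        rw [hb', if_pos rfl]
        omega


-- A-side loop ---------------------------------------------------------------

theorem pvPredLoopNeg (vs : List Int) (s : Int) : ∀ (f : Nat) (c : Int), c < 0 →
    pvPredLoop vs s f c = false := by
  intro f
  induction f with
  | zero =>
    intro c hc
    unfold pvPredLoop
    rw [if_neg (by omega)]
  | succ f IH =>
    intro c hc
    unfold pvPredLoop
    rw [if_neg (by omega)]
    have hbit : 0 ≤ PySem.Int.band c (-c) := pvBandNegNonneg c hc
    have hc' : PySem.Int.bxor c (PySem.Int.band c (-c)) < 0 := pvBxorNegNonneg _ _ hc hbit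
    by_cases hmem : vs.contains (PySem.Int.bxor s (PySem.Int.band c (-c))) = true
    · simp only [hmem, if_true]
      exact IH _ hc'
    · simp only [Bool.not_eq_true] at hmem
      show (if vs.contains (PySem.Int.bxor s (PySem.Int.band c (-c))) = true then
          pvPredLoop vs s f (PySem.Int.bxor c (PySem.Int.band c (-c))) else false) = false
      rw [hmem]
      simp

theorem pvPredLoopChar (vs : List Int) (ns : Nat) : ∀ (f : Nat) (nc : Nat), nc < f →
    (∀ i, nc.testBit i = true → ns.testBit i = true) →
    (pvPredLoop vs (ns : Int) f (nc : Int) = true ↔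
      (∀ i, nc.testBit i = true → ((ns ^^^ 2 ^ i : Nat) : Int) ∈ vs)) := by
  intro f
  induction f with
  | zero => intro nc h; omega
  | succ f IH =>
    intro nc hlt hsub
    rcases Nat.eq_zero_or_pos nc with h0 | h0
    · subst h0
      unfold pvPredLoop
      rw [if_pos (by simp)]
      simp [Nat.zero_testBit]
    · have hnc : nc ≠ 0 := by omega
      obtain ⟨j, hj, hlow⟩ := pvLowbitSpec nc hnc
      have hbit : PySem.Int.band (nc : Int) (-(nc : Int)) = ((2 ^ j : Nat) : Int) := by
        rw [pvBandNegSelf nc hnc, hlow]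
      have h2j : ∀ i, (2 ^ j).testBit i = true → nc.testBit i = true := by
        intro i hi
        simp [Nat.testBit_two_pow] at hi
        subst hi
        exact hj
      have hxor : nc ^^^ 2 ^ j = nc - 2 ^ j := by
        have := pvXorAdd nc (2 ^ j) h2j
        omega
      have h2le : 2 ^ j ≤ nc := Nat.ge_two_pow_of_testBit hj
      have hpred : PySem.Int.bxor (ns : Int) (PySem.Int.band (nc : Int) (-(nc : Int)))
          = ((ns ^^^ 2 ^ j : Nat) : Int) := by
        rw [hbit, ← PySem.Int.bxor_natCast]
      have hcand : PySem.Int.bxor (nc : Int) (PySem.Int.band (nc : Int) (-(nc : Int)))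
          = ((nc ^^^ 2 ^ j : Nat) : Int) := by
        rw [hbit, ← PySem.Int.bxor_natCast]
      have hsub' : ∀ i, (nc ^^^ 2 ^ j).testBit i = true → ns.testBit i = true := by
        intro i hi
        rw [Nat.testBit_xor] at hi
        rcases eq_or_ne i j with rfl | hij
        · simp [hj, Nat.testBit_two_pow] at hi
        · apply hsub
          simpa [Nat.testBit_two_pow, (Ne.symm hij)] using hi
      have hlt' : nc ^^^ 2 ^ j < f := by
        have hpos : 0 < 2 ^ j := Nat.two_pow_pos j
        omega
      have IH' := IH (nc ^^^ 2 ^ j) hlt' hsub'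
      have hbits : ∀ i, (nc ^^^ 2 ^ j).testBit i = (nc.testBit i && !((2:Nat) ^ j).testBit i) := by
        intro i
        rw [Nat.testBit_xor]
        rcases eq_or_ne i j with rfl | hij
        · simp [hj, Nat.testBit_two_pow]
        · simp [Nat.testBit_two_pow, (Ne.symm hij)]
      unfold pvPredLoop
      rw [if_neg (by exact_mod_cast hnc)]
      show ((if vs.contains (PySem.Int.bxor (ns : Int) (PySem.Int.band (nc : Int) (-(nc : Int)))) = true then
          pvPredLoop vs (ns : Int) f (PySem.Int.bxor (nc : Int) (PySem.Int.band (nc : Int) (-(nc : Int)))) else false) = true) ↔ _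
      rw [hpred, hcand]
      by_cases hmem : ((ns ^^^ 2 ^ j : Nat) : Int) ∈ vs
      · rw [if_pos (List.contains_iff_mem.mpr hmem)]
        rw [IH']
        constructor
        · intro hall i hi
          rcases eq_or_ne i j with rfl | hij
          · exact hmem
          · apply hall
            rw [hbits]
            simp [hi, Nat.testBit_two_pow, Ne.symm hij]
        · intro hall i hi
          rw [hbits] at hi
          simp only [Bool.and_eq_true] at hi
          exact hall i hi.1
      · rw [if_neg (by
          intro hcon
          exact hmem (List.contains_iff_mem.mp hcon))]
        simp only [Bool.false_eq_true, false_iff]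
        intro hall
        exact hmem (hall j hj)

-- counting helpers ----------------------------------------------------------


theorem pvCountPOrDisjoint {a : Type} (l : List a) (p q : a → Bool)
    (h : ∀ x ∈ l, ¬(p x = true ∧ q x = true)) :
    l.countP (fun x => p x || q x) = l.countP p + l.countP q := by
  induction l with
  | nil => simp
  | cons x t IH =>
    have hx := h x (by simp)
    have ht : ∀ y ∈ t, ¬(p y = true ∧ q y = true) := fun y hy => h y (by simp [hy])
    rw [List.countP_cons, List.countP_cons, List.countP_cons, IH ht]
    cases hp : p x <;> cases hq : q x <;> simp [hp, hq] at hx ⊢ <;> omega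

theorem pvCountPBeqNodup {a : Type} [DecidableEq a] (l : List a) (v : a) (hl : l.Nodup) :
    l.countP (fun x => x == v) = if v ∈ l then 1 else 0 := by
  have h1 : l.countP (fun x => x == v) = l.count v := by
    rw [List.count]
  rw [h1]
  split_ifs with hm
  · exact List.count_eq_one_of_mem hl hm
  · exact List.count_eq_zero.mpr hm

theorem pvCountPUnique {a : Type} (l : List a) (p : a → Bool) (hl : l.Nodup)
    (huniq : ∀ x y, p x = true → p y = true → x = y) :
    l.countP p = if ∃ x ∈ l, p x = true then 1 else 0 := by
  induction l with
  | nil => simp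
  | cons x t IH =>
    have hnd := hl
    rw [List.nodup_cons] at hnd
    rw [List.countP_cons, IH hnd.2]
    cases hp : p x with
    | true =>
      have hnone : ¬ ∃ y ∈ t, p y = true := by
        rintro ⟨y, hy, hpy⟩
        exact hnd.1 (huniq x y hp hpy ▸ hy)
      simp [hp, hnone]
    | false =>
      simp only [Bool.false_eq_true, if_false, add_zero]
      by_cases hex : ∃ y ∈ t, p y = true
      · rcases hex with ⟨y, hy, hpy⟩
        have hex1 : ∃ y ∈ t, p y = true := ⟨y, hy, hpy⟩
        have hex2 : ∃ y ∈ x :: t, p y = true := ⟨y, by simp [hy], hpy⟩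
        rw [if_pos hex1, if_pos hex2]
      · have hex2 : ¬ ∃ y ∈ x :: t, p y = true := by
          rintro ⟨y, hy, hpy⟩
          rcases List.mem_cons.mp hy with rfl | hy'
          · rw [hp] at hpy; exact absurd hpy (by simp)
          · exact hex ⟨y, hy', hpy⟩
        rw [if_neg hex, if_neg hex2]

theorem pvCountPExchange {a b : Type} [DecidableEq a] (l : List a) (bs : List b) (f : b → a)
    (hl : l.Nodup) (hbs : bs.Nodup) (hf : ∀ x ∈ bs, ∀ y ∈ bs, f x = f y → x = y) :
    l.countP (fun v => decide (∃ j ∈ bs, v = f j)) = bs.countP (fun j => decide (f j ∈ l)) := by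
  induction bs with
  | nil => simp
  | cons x t IH =>
    have hnd := hbs
    rw [List.nodup_cons] at hnd
    have hft : ∀ u ∈ t, ∀ v ∈ t, f u = f v → u = v := by
      intro u hu v hv
      exact hf u (by simp [hu]) v (by simp [hv])
    have hsplit : ∀ v, (decide (∃ j ∈ x :: t, v = f j)) =
        ((v == f x) || decide (∃ j ∈ t, v = f j)) := by
      intro v
      by_cases h1 : v = f x
      · subst h1
        have hex : ∃ j ∈ x :: t, f x = f j := ⟨x, by simp, rfl⟩
        rw [decide_eq_true hex]
        simp
      · have hbeq : (v == f x) = false := by simp [h1]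
        rw [hbeq, Bool.false_or, decide_eq_decide]
        constructor
        · rintro ⟨j, hj, hv⟩
          rcases List.mem_cons.mp hj with rfl | hj'
          · exact absurd hv h1
          · exact ⟨j, hj', hv⟩
        · rintro ⟨j, hj, hv⟩
          exact ⟨j, List.mem_cons_of_mem x hj, hv⟩
      
    rw [List.countP_congr (fun v _ => by rw [hsplit v])]
    rw [pvCountPOrDisjoint l _ _ (by
      intro v _ ⟨h1, h2⟩
      simp only [beq_iff_eq] at h1
      simp only [decide_eq_true_eq] at h2
      rcases h2 with ⟨j, hj, hv⟩
      exact hnd.1 (hf x (by simp) j (by simp [hj]) (by rw [← h1, hv]) ▸ hj))]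
    rw [pvCountPBeqNodup l (f x) hl, IH hnd.2 hft, List.countP_cons]
    simp only [decide_eq_true_eq]
    split_ifs with h1 <;> omega

theorem pvCountPEqIff {a : Type} (l : List a) (p q : a → Bool)
    (himp : ∀ x ∈ l, q x = true → p x = true) :
    (l.countP q = l.countP p ↔ ∀ x ∈ l, p x = true → q x = true) := by
  induction l with
  | nil => simp
  | cons x t IH =>
    have ht : ∀ y ∈ t, q y = true → p y = true := fun y hy => himp y (by simp [hy])
    have hle : t.countP q ≤ t.countP p := List.countP_mono_left ht
    rw [List.countP_cons, List.countP_cons]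
    constructor
    · intro heq
      have hx := himp x (by simp)
      have hteq : t.countP q = t.countP p := by
        cases hq : q x
        · cases hp : p x
          · rw [hq, hp] at heq; simp at heq; omega
          · rw [hq, hp] at heq; simp at heq; omega
        · cases hp : p x
          · rw [hq, hp] at hx
            exact absurd (hx rfl) (by simp)
          · rw [hq, hp] at heq; simp at heq; omega
      have hxeq : p x = true → q x = true := by
        intro hp
        cases hq : q x with
        | false => rw [hq, hp] at heq; simp at heq; omega
        | true => rfl
      intro y hy hpy
      rcases List.mem_cons.mp hy with rfl | hy'
      · exact hxeq hpy
      · exact (IH ht).mp hteq y hy' hpy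
    · intro hall
      have heq : t.countP q = t.countP p := (IH ht).mpr (fun y hy => hall y (by simp [hy]))
      have hxx : (if q x = true then 1 else 0) = (if p x = true then 1 else 0) := by
        cases hq : q x <;> cases hp : p x <;> simp [hq, hp]
        · exact absurd (hall x (by simp) hp) (by simp [hq])
        · exact absurd (himp x (by simp) hq) (by simp [hp])
      omega

-- universe fold -------------------------------------------------------------

theorem pvUnivSpec (l : List Int) : ∀ (init : Int), 0 ≤ init →
    0 ≤ l.foldl (fun u s => if 0 ≤ s then PySem.Int.bor u s else u) init ∧
    (∀ i, init.toNat.testBit i = true →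
      (l.foldl (fun u s => if 0 ≤ s then PySem.Int.bor u s else u) init).toNat.testBit i = true) ∧
    (∀ s ∈ l, 0 ≤ s → ∀ i, s.toNat.testBit i = true →
      (l.foldl (fun u s => if 0 ≤ s then PySem.Int.bor u s else u) init).toNat.testBit i = true) := by
  induction l with
  | nil => intro init h; exact ⟨h, fun i hi => hi, fun s hs => absurd hs (by simp)⟩
  | cons x t IH =>
    intro init h0
    simp only [List.foldl_cons]
    by_cases hx : 0 ≤ x
    · rw [if_pos hx]
      have hbor : PySem.Int.bor init x = ((init.toNat ||| x.toNat : Nat) : Int) :=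
        PySem.Int.bor_of_nonneg h0 hx
      have h0' : 0 ≤ PySem.Int.bor init x := by rw [hbor]; positivity
      obtain ⟨ha, hb, hc⟩ := IH (PySem.Int.bor init x) h0'
      have hbit : ∀ i, (init.toNat.testBit i = true ∨ x.toNat.testBit i = true) →
          (PySem.Int.bor init x).toNat.testBit i = true := by
        intro i hi
        rw [hbor, Int.toNat_natCast, Nat.testBit_lor]
        rcases hi with hi | hi <;> simp [hi]
      refine ⟨ha, fun i hi => hb i (hbit i (Or.inl hi)), ?_⟩
      rintro s hs hsn i hi
      rcases List.mem_cons.mp hs with rfl | hs'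
      · exact hb i (hbit i (Or.inr hi))
      · exact hc s hs' hsn i hi
    · rw [if_neg hx]
      obtain ⟨ha, hb, hc⟩ := IH init h0
      refine ⟨ha, hb, ?_⟩
      rintro s hs hsn i hi
      rcases List.mem_cons.mp hs with rfl | hs'
      · exact absurd hsn hx
      · exact hc s hs' hsn i hi


-- B-side dict ---------------------------------------------------------------

-- the successor keys generated for one family member v (nonnegative case)
def pvSuccKeys (univ v : Int) : List Int :=
  ((PySem.List.pyRange 0 (PySem.Int.bitLength (PySem.Int.band univ (Int.not v)) : Int) 1).filter
    (fun i => decide (PySem.Int.band (Int.shiftRight (PySem.Int.band univ (Int.not v)) i.toNat) 1 ≠ 0))).map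
    (fun i => PySem.Int.bor v (Int.shiftLeft 1 i.toNat))

def pvKeyList (univ : Int) (vsList : List Int) : List Int :=
  vsList.flatMap (fun v => if v < 0 then [] else pvSuccKeys univ v)

def pvInner (univ : Int) (c : PySem.Dict Int Int) (v : Int) : PySem.Dict Int Int :=
  if v < 0 then c
  else
    let free := PySem.Int.band univ (Int.not v)
    (PySem.List.pyRange 0 (PySem.Int.bitLength free : Int) 1).foldl (fun c i =>
      if PySem.Int.band (Int.shiftRight free i.toNat) 1 ≠ 0 then
        let succ := PySem.Int.bor v (Int.shiftLeft 1 i.toNat)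
        c.insert succ (c.getD succ 0 + 1)
      else c) c

theorem pvInnerGetD (univ v : Int) (d : PySem.Dict Int Int) (k : Int) :
    (pvInner univ d v).getD k 0 = d.getD k 0 + ((if v < 0 then [] else pvSuccKeys univ v).count k : Int) := by
  by_cases hv : v < 0
  · simp [pvInner, hv]
  · rw [pvInner, if_neg hv, if_neg hv]
    show (List.foldl (fun c i =>
      if PySem.Int.band (Int.shiftRight (PySem.Int.band univ (Int.not v)) i.toNat) 1 ≠ 0 then
        c.insert (PySem.Int.bor v (Int.shiftLeft 1 i.toNat))
          (c.getD (PySem.Int.bor v (Int.shiftLeft 1 i.toNat)) 0 + 1)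
      else c) d
      (PySem.List.pyRange 0 (PySem.Int.bitLength (PySem.Int.band univ (Int.not v)) : Int) 1)).getD k 0
      = d.getD k 0 + ((pvSuccKeys univ v).count k : Int)
    have hstep := PySem.List.foldl_ite_eq_foldl_filter
      (p := fun i : Int => PySem.Int.band (Int.shiftRight (PySem.Int.band univ (Int.not v)) i.toNat) 1 ≠ 0)
      (f := fun (c : PySem.Dict Int Int) (i : Int) => c.insert (PySem.Int.bor v (Int.shiftLeft 1 i.toNat))
        (c.getD (PySem.Int.bor v (Int.shiftLeft 1 i.toNat)) 0 + 1))
      (l := PySem.List.pyRange 0 (PySem.Int.bitLength (PySem.Int.band univ (Int.not v)) : Int) 1)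
      (init := d)
    rw [hstep]
    have hmap := (List.foldl_map
      (f := fun i : Int => PySem.Int.bor v (Int.shiftLeft 1 i.toNat))
      (g := fun (c : PySem.Dict Int Int) (x : Int) => c.insert x (c.getD x 0 + 1))
      (l := (PySem.List.pyRange 0 (PySem.Int.bitLength (PySem.Int.band univ (Int.not v)) : Int) 1).filter
        (fun i => decide (PySem.Int.band (Int.shiftRight (PySem.Int.band univ (Int.not v)) i.toNat) 1 ≠ 0)))
      (init := d)).symm
    rw [hmap]
    rw [PySem.Dict.getD_foldl_insert_add_one]
    rfl


theorem pvCountGetD (univ : Int) (vsList : List Int) (k : Int) :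
    (vsList.foldl (pvInner univ) PySem.Dict.empty).getD k 0
      = ((pvKeyList univ vsList).count k : Int) := by
  suffices h : ∀ d : PySem.Dict Int Int,
      (vsList.foldl (pvInner univ) d).getD k 0 = d.getD k 0 + ((pvKeyList univ vsList).count k : Int) by
    rw [h PySem.Dict.empty]
    simp [PySem.Dict.getD_empty]
  induction vsList with
  | nil => intro d; simp [pvKeyList]
  | cons v t IH =>
    intro d
    rw [List.foldl_cons, IH, pvInnerGetD]
    have : pvKeyList univ (v :: t) = (if v < 0 then [] else pvSuccKeys univ v) ++ pvKeyList univ t := by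
      simp [pvKeyList]
    rw [this, List.count_append]
    push_cast
    ring

theorem pvXorTwoPowInj (ns i j : Nat) (h : ns ^^^ 2 ^ i = ns ^^^ 2 ^ j) : i = j := by
  have h2 : (2:Nat) ^ i = 2 ^ j := by
    have := congrArg (fun x => ns ^^^ x) h
    simpa [← Nat.xor_assoc] using this
  exact Nat.pow_right_injective (by omega) h2


theorem pvKeyNonneg (univ : Int) (vsList : List Int) (k : Int)
    (hk : k ∈ pvKeyList univ vsList) : 0 ≤ k := by
  rw [pvKeyList, List.mem_flatMap] at hk
  obtain ⟨v, hv, hkv⟩ := hk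
  by_cases hneg : v < 0
  · rw [if_pos hneg] at hkv; simp at hkv
  · rw [if_neg hneg] at hkv
    rw [pvSuccKeys, List.mem_map] at hkv
    obtain ⟨i, _, rfl⟩ := hkv
    have h2 : (0:Int) ≤ Int.shiftLeft 1 i.toNat := by
      rw [pvShiftLeftOne]; positivity
    rw [PySem.Int.bor_of_nonneg (by omega) h2]
    positivity


theorem pvSuccKeysCount (nu : Nat) (v : Int) (ns : Nat)
    (hU : ∀ i, ns.testBit i = true → nu.testBit i = true) (w : Nat) (hw : ns < 2 ^ w) :
    ((if v < 0 then [] else pvSuccKeys (nu : Int) v).count ((ns : Int)))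
      = if ∃ j ∈ List.range w, ns.testBit j = true ∧ v = ((ns ^^^ 2 ^ j : Nat) : Int) then 1 else 0 := by
  by_cases hneg : v < 0
  · rw [if_pos hneg]
    have hno : ¬ ∃ j ∈ List.range w, ns.testBit j = true ∧ v = ((ns ^^^ 2 ^ j : Nat) : Int) := by
      rintro ⟨j, _, _, rfl⟩
      omega
    rw [if_neg hno]
    simp
  · rw [if_neg hneg]
    lift v to Nat using (by omega : (0:Int) ≤ v) with nv
    -- free mask
    have hfree : PySem.Int.band (nu : Int) (Int.not (nv : Int)) = ((nu - (nu &&& nv) : Nat) : Int) :=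
      pvBandNotCast nu nv
    set nf := nu - (nu &&& nv) with hnf
    have hsubm : ∀ i, (nu &&& nv).testBit i = true → nu.testBit i = true := by
      intro i hi
      rw [Nat.testBit_and, Bool.and_eq_true] at hi
      exact hi.1
    have hfx : nf = nu ^^^ (nu &&& nv) := pvSubmaskSub _ _ hsubm
    have hnfbit : ∀ i, nf.testBit i = (nu.testBit i && !nv.testBit i) := by
      intro i
      rw [hfx, Nat.testBit_xor, Nat.testBit_and]
      cases nu.testBit i <;> cases nv.testBit i <;> rfl
    -- unfold pvSuccKeys counting
    rw [pvSuccKeys, hfree]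
    rw [List.count, List.countP_map]
    rw [List.countP_filter]
    rw [PySem.List.pyRange_zero_natCast (PySem.Int.bitLength (nf : Int))]
    rw [List.countP_map]
    set bl := PySem.Int.bitLength (nf : Int) with hbl
    refine Eq.trans (List.countP_congr
      (q := fun i : Nat => decide (ns.testBit i = true ∧ nv = ns ^^^ 2 ^ i)) ?_) ?_
    · intro i _
      simp only [Function.comp_apply, Bool.and_eq_true, beq_iff_eq, decide_eq_true_eq,
        Int.toNat_natCast]
      have h2 : PySem.Int.bor (nv : Int) (Int.shiftLeft 1 i) = ((nv ||| 2 ^ i : Nat) : Int) := by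
        rw [pvShiftLeftOne, PySem.Int.bor_natCast]
      rw [h2, pvTestBitInt nf i]
      constructor
      · rintro ⟨hor, hnfi⟩
        have hor' : nv ||| 2 ^ i = ns := by exact_mod_cast hor
        rw [hnfbit, Bool.and_eq_true, Bool.not_eq_eq_eq_not] at hnfi
        obtain ⟨hnu, hnv⟩ := hnfi
        have hnsbit : ns.testBit i = true := by
          rw [← hor', Nat.testBit_lor, Nat.testBit_two_pow]
          simp
        refine ⟨hnsbit, ?_⟩
        apply Nat.eq_of_testBit_eq
        intro m
        rw [Nat.testBit_xor, Nat.testBit_two_pow, ← hor', Nat.testBit_lor, Nat.testBit_two_pow]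
        rcases eq_or_ne i m with rfl | him
        · simpa using hnv
        · simp [him]
      · rintro ⟨hns, rfl⟩
        have hnvi : (ns ^^^ 2 ^ i).testBit i = false := by
          rw [Nat.testBit_xor, Nat.testBit_two_pow, hns]
          simp
        have hor' : (ns ^^^ 2 ^ i) ||| 2 ^ i = ns := by
          apply Nat.eq_of_testBit_eq
          intro m
          rw [Nat.testBit_lor, Nat.testBit_xor, Nat.testBit_two_pow]
          rcases eq_or_ne i m with rfl | him
          · simp [hns]
          · simp [him]
        refine ⟨by exact_mod_cast congrArg (fun n : Nat => (n : Int)) hor', ?_⟩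
        rw [hnfbit, Bool.and_eq_true, Bool.not_eq_eq_eq_not, hnvi]
        exact ⟨hU i hns, rfl⟩
    · rw [pvCountPUnique _ _ List.nodup_range (by
        intro x y hx hy
        simp only [decide_eq_true_eq] at hx hy
        exact pvXorTwoPowInj ns x y (hx.2 ▸ hy.2 ▸ rfl))]
      have hiff : (∃ x ∈ List.range bl, decide (ns.testBit x = true ∧ nv = ns ^^^ 2 ^ x) = true) ↔
          (∃ j ∈ List.range w, ns.testBit j = true ∧ ((nv : Nat) : Int) = ((ns ^^^ 2 ^ j : Nat) : Int)) := by
        constructor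
        · rintro ⟨x, _, hx⟩
          simp only [decide_eq_true_eq] at hx
          have hxw : x < w := by
            have h2x : 2 ^ x ≤ ns := Nat.ge_two_pow_of_testBit hx.1
            have hlt : (2:Nat) ^ x < 2 ^ w := by omega
            exact (Nat.pow_lt_pow_iff_right (by omega)).mp hlt
          exact ⟨x, List.mem_range.mpr hxw, hx.1,
            by exact_mod_cast congrArg (fun n : Nat => (n : Int)) hx.2⟩
        · rintro ⟨j, _, hj, hvj⟩
          have hvj' : nv = ns ^^^ 2 ^ j := by exact_mod_cast hvj
          have hnfj : nf.testBit j = true := by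
            rw [hnfbit, Bool.and_eq_true, Bool.not_eq_eq_eq_not]
            refine ⟨hU j hj, ?_⟩
            rw [hvj', Nat.testBit_xor, Nat.testBit_two_pow, hj]
            simp
          exact ⟨j, List.mem_range.mpr (pvTestBitLtBitLength nf j hnfj),
            by simp only [decide_eq_true_eq]; exact ⟨hj, hvj'⟩⟩
      split_ifs with h1 h2 h2
      · rfl
      · exact absurd (hiff.mp h1) h2
      · exact absurd (hiff.mpr h2) h1
      · rfl


-- count of a nonnegative key = number of set bits of ns whose removal lands in vsList
theorem pvKeyCount (nu : Nat) (vsList : List Int) (hnd : vsList.Nodup) (ns : Nat)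
    (hU : ∀ i, ns.testBit i = true → nu.testBit i = true) (w : Nat) (hw : ns < 2 ^ w) :
    (pvKeyList (nu : Int) vsList).count ((ns : Int))
      = (List.range w).countP (fun j => ns.testBit j && decide (((ns ^^^ 2 ^ j : Nat) : Int) ∈ vsList)) := by
  have hstepA : ∀ l : List Int, (pvKeyList (nu : Int) l).count ((ns : Int))
      = l.countP (fun v => decide (∃ j ∈ List.range w, ns.testBit j = true ∧ v = ((ns ^^^ 2 ^ j : Nat) : Int))) := by
    intro l
    induction l with
    | nil => simp [pvKeyList]
    | cons v t IH =>
      have hcons : pvKeyList (nu : Int) (v :: t)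
          = (if v < 0 then [] else pvSuccKeys (nu : Int) v) ++ pvKeyList (nu : Int) t := by
        simp [pvKeyList]
      rw [hcons, List.count_append, IH, List.countP_cons, pvSuccKeysCount nu v ns hU w hw]
      have : (decide (∃ j ∈ List.range w, ns.testBit j = true ∧ v = ((ns ^^^ 2 ^ j : Nat) : Int)) = true)
          ↔ (∃ j ∈ List.range w, ns.testBit j = true ∧ v = ((ns ^^^ 2 ^ j : Nat) : Int)) := by
        simp
      by_cases h1 : ∃ j ∈ List.range w, ns.testBit j = true ∧ v = ((ns ^^^ 2 ^ j : Nat) : Int)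
      · rw [if_pos h1, if_pos (this.mpr h1)]
        omega
      · rw [if_neg h1, if_neg (fun hc => h1 (this.mp hc))]
        omega
  rw [hstepA vsList]
  have hbs : ((List.range w).filter ns.testBit).Nodup := List.Nodup.filter _ List.nodup_range
  have hfinj : ∀ x ∈ (List.range w).filter ns.testBit, ∀ y ∈ (List.range w).filter ns.testBit,
      ((ns ^^^ 2 ^ x : Nat) : Int) = ((ns ^^^ 2 ^ y : Nat) : Int) → x = y := by
    intro x _ y _ h
    exact pvXorTwoPowInj ns x y (by exact_mod_cast h)
  have hexch := pvCountPExchange vsList ((List.range w).filter ns.testBit)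
    (fun j => ((ns ^^^ 2 ^ j : Nat) : Int)) hnd hbs hfinj
  have hpredEq : ∀ v ∈ vsList,
      (decide (∃ j ∈ List.range w, ns.testBit j = true ∧ v = ((ns ^^^ 2 ^ j : Nat) : Int)) = true)
        ↔ (decide (∃ j ∈ (List.range w).filter ns.testBit, v = ((ns ^^^ 2 ^ j : Nat) : Int)) = true) := by
    intro v _
    simp only [decide_eq_true_eq, List.mem_filter]
    constructor
    · rintro ⟨j, hjw, hjb, hv⟩
      exact ⟨j, ⟨hjw, hjb⟩, hv⟩
    · rintro ⟨j, ⟨hjw, hjb⟩, hv⟩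
      exact ⟨j, hjw, hjb, hv⟩
  rw [List.countP_congr hpredEq, hexch]
  rw [List.countP_filter]
  apply List.countP_congr
  intro j _
  simp only [Bool.and_eq_true, decide_eq_true_eq]
  tauto


-- final assembly ------------------------------------------------------------

-- pointwise agreement of the two filters
theorem pvFilterAgree (v_family : List Int) (v0 : Int)
    (subsets : List Int) (s : Int) (hs : s ∈ subsets) :
    ((!(decide ((PySem.Int.bitCount s : Int) ≠ (PySem.Int.bitCount v0 : Int) + 1))) &&
        pvPredLoop (PySem.Set.ofList v_family) s (s.natAbs + 1) s)
      = (((PySem.Int.bitCount s : Int) == (PySem.Int.bitCount v0 : Int) + 1) &&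
        (((PySem.Set.ofList v_family).foldl
            (pvInner (subsets.foldl (fun u s => if 0 ≤ s then PySem.Int.bor u s else u) 0))
            PySem.Dict.empty).getD s 0 == (PySem.Int.bitCount v0 : Int) + 1)) := by
  set t : Int := (PySem.Int.bitCount v0 : Int) + 1 with ht
  set V : List Int := PySem.Set.ofList v_family with hV
  set univ : Int := subsets.foldl (fun u s => if 0 ≤ s then PySem.Int.bor u s else u) 0 with huniv
  have ht1 : 1 ≤ t := by rw [ht]; omega
  obtain ⟨hu0, _, husup⟩ := pvUnivSpec subsets 0 le_rfl
  rw [← huniv] at hu0 husup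
  by_cases hbc : (PySem.Int.bitCount s : Int) = t
  · -- ranks match; compare the two verdicts
    have h1 : (!(decide ((PySem.Int.bitCount s : Int) ≠ t))) = true := by simp [hbc]
    have h2 : ((PySem.Int.bitCount s : Int) == t) = true := by simp [hbc]
    rw [h1, h2, Bool.true_and, Bool.true_and]
    rw [pvCountGetD]
    by_cases hneg : s < 0
    · rw [pvPredLoopNeg V s _ s hneg]
      have hnotin : ((s : Int)) ∉ pvKeyList univ V := fun hin =>
        absurd (pvKeyNonneg univ V s hin) (by omega)
      rw [List.count_eq_zero.mpr hnotin]
      have : ¬ ((0 : Int) == t) = true := by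
        simp only [beq_iff_eq]
        omega
      simp only [Nat.cast_zero]
      cases hb : ((0 : Int) == t) with
      | true => exact absurd hb this
      | false => rfl
    · lift s to Nat using (by omega : (0:Int) ≤ s) with ns
      have hw : ns < 2 ^ ns := Nat.lt_two_pow_self
      have hU : ∀ i, ns.testBit i = true → univ.toNat.testBit i = true := by
        intro i hi
        have := husup ((ns : Int)) hs (by positivity) i
        simpa using this hi
      have hucast : univ = ((univ.toNat : Nat) : Int) := by omega
      have hchar := pvPredLoopChar V ns (ns + 1) ns (by omega) (fun i hi => hi)
      have hnatabs : ((ns : Int)).natAbs = ns := Int.natAbs_natCast ns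
      rw [hnatabs]
      have hcnt : (pvKeyList univ V).count ((ns : Int))
          = (List.range ns).countP (fun j => ns.testBit j && decide (((ns ^^^ 2 ^ j : Nat) : Int) ∈ V)) := by
        rw [hucast]
        exact pvKeyCount univ.toNat V (hV ▸ PySem.Set.nodup_ofList v_family) ns hU ns hw
      rw [hcnt]
      have hbcP : t = ((List.range ns).countP ns.testBit : Int) := by
        rw [← hbc]
        exact pvBitCountCountP ns ns hw
      have hEq := pvCountPEqIff (List.range ns) ns.testBit
        (fun j => ns.testBit j && decide (((ns ^^^ 2 ^ j : Nat) : Int) ∈ V))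
        (fun x _ hq => by simp only [Bool.and_eq_true] at hq; exact hq.1)
      have hbound : ∀ i, ns.testBit i = true → i < ns := by
        intro i hi
        have h2x : 2 ^ i ≤ ns := Nat.ge_two_pow_of_testBit hi
        have hlt : (2:Nat) ^ i < 2 ^ ns := by omega
        exact (Nat.pow_lt_pow_iff_right (by omega)).mp hlt
      cases hA : pvPredLoop V ((ns : Int)) (ns + 1) ((ns : Int)) with
      | true =>
        have hall := hchar.mp hA
        have hcount : (List.range ns).countP
            (fun j => ns.testBit j && decide (((ns ^^^ 2 ^ j : Nat) : Int) ∈ V))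
            = (List.range ns).countP ns.testBit := by
          rw [hEq]
          intro x _ hx
          simp [hx, hall x hx]
        rw [hcount, ← hbcP]
        simp
      | false =>
        have hnot : ¬ (∀ i, ns.testBit i = true → ((ns ^^^ 2 ^ i : Nat) : Int) ∈ V) := by
          intro hall
          rw [hchar.mpr hall] at hA
          exact absurd hA (by simp)
        have hne : (List.range ns).countP
            (fun j => ns.testBit j && decide (((ns ^^^ 2 ^ j : Nat) : Int) ∈ V))
            ≠ (List.range ns).countP ns.testBit := by
          intro he
          apply hnot
          intro i hi
          have hq := (hEq.mp he) i (List.mem_range.mpr (hbound i hi)) hi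
          simp only [Bool.and_eq_true] at hq
          exact of_decide_eq_true hq.2
        symm
        rw [Bool.eq_false_iff]
        intro hbeq
        apply hne
        have : ((List.range ns).countP
            (fun j => ns.testBit j && decide (((ns ^^^ 2 ^ j : Nat) : Int) ∈ V)) : Int) = t :=
          by simpa [beq_iff_eq] using hbeq
        rw [hbcP] at this
        exact_mod_cast this
  · have h1 : (!(decide ((PySem.Int.bitCount s : Int) ≠ t))) = false := by simp [hbc]
    have h2 : ((PySem.Int.bitCount s : Int) == t) = false := by simp [hbc]
    rw [h1, h2, Bool.false_and, Bool.false_and]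


-- ===== VERDICT (by name: the statement is the Claim_ definition above) =====
theorem t_of_v_family_spec : Claim_equal_t_of_v_family := by
  intro v_family subsets _
  unfold Spec_t_of_v_family
  cases v_family with
  | nil => rfl
  | cons v0 vt =>
    have hA : t_of_v_family (v0 :: vt) subsets
        = PySem.List.sorted (subsets.foldl (fun targets subset =>
            if (PySem.Int.bitCount subset : Int) ≠ (PySem.Int.bitCount v0 : Int) + 1 then targets
            else if pvPredLoop (PySem.Set.ofList (v0 :: vt)) subset (subset.natAbs + 1) subset then
              targets ++ [subset]
            else targets) []) (fun x => x) false := rfl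
    have hB : t_of_v_family_alt (v0 :: vt) subsets
        = PySem.List.sorted (subsets.filter (fun s =>
            ((PySem.Int.bitCount s : Int) == (PySem.Int.bitCount v0 : Int) + 1) &&
            (((PySem.Set.ofList (v0 :: vt)).foldl
                (pvInner (subsets.foldl (fun u s => if 0 ≤ s then PySem.Int.bor u s else u) 0))
                PySem.Dict.empty).getD s 0 == (PySem.Int.bitCount v0 : Int) + 1)))
          (fun x => x) false := rfl
    rw [hA, hB]
    have hstep : ∀ (acc : List Int) (s : Int), s ∈ subsets →
        (if (PySem.Int.bitCount s : Int) ≠ (PySem.Int.bitCount v0 : Int) + 1 then acc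
          else if pvPredLoop (PySem.Set.ofList (v0 :: vt)) s (s.natAbs + 1) s then acc ++ [s]
          else acc)
        = (if ((!(decide ((PySem.Int.bitCount s : Int) ≠ (PySem.Int.bitCount v0 : Int) + 1))) &&
              pvPredLoop (PySem.Set.ofList (v0 :: vt)) s (s.natAbs + 1) s) = true
            then acc ++ [s] else acc) := by
      intro acc s _
      by_cases hbc : (PySem.Int.bitCount s : Int) ≠ (PySem.Int.bitCount v0 : Int) + 1
      · rw [if_pos hbc]
        have : (!(decide ((PySem.Int.bitCount s : Int) ≠ (PySem.Int.bitCount v0 : Int) + 1))) = false := by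
          simp [hbc]
        rw [this, Bool.false_and]
        simp
      · rw [if_neg hbc]
        have : (!(decide ((PySem.Int.bitCount s : Int) ≠ (PySem.Int.bitCount v0 : Int) + 1))) = true := by
          simp [hbc]
        rw [this, Bool.true_and]
    have hfold := PySem.List.foldl_congr_mem
      (l := subsets) (init := ([] : List Int))
      (f := fun targets subset =>
        if (PySem.Int.bitCount subset : Int) ≠ (PySem.Int.bitCount v0 : Int) + 1 then targets
        else if pvPredLoop (PySem.Set.ofList (v0 :: vt)) subset (subset.natAbs + 1) subset then
          targets ++ [subset]
        else targets)
      (g := fun acc s =>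
        if ((!(decide ((PySem.Int.bitCount s : Int) ≠ (PySem.Int.bitCount v0 : Int) + 1))) &&
            pvPredLoop (PySem.Set.ofList (v0 :: vt)) s (s.natAbs + 1) s) = true
          then acc ++ [s] else acc)
      hstep
    rw [hfold]
    rw [PySem.List.foldl_append_if_eq_filter]
    rw [List.nil_append]
    rw [List.filter_congr (fun s hs => pvFilterAgree (v0 :: vt) v0 subsets s hs)]
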